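-- pv_equiv track=rewrite | github.com/kant/lale | lale/sklearn_compat.py | partition_sklearn_params
-- ===== SOURCE A (Python) =====
-- from typing import Any, Dict, Optional, List, Set
--
-- def partition_sklearn_params(d:Dict[str, Any])->Dict[str, Dict[str, Any]]:
--     ret:Dict[str, Dict[str, Any]] = {}
--     for k, v in d.items():
--         ks = k.split("__", 1)
--         assert len(ks) == 2
--         bucket:Dict[str, Any] = {}
--         group:str = ks[0]
--         param:str = ks[1]
--         if group in ret:
--             bucket = ret[group]
--         else:
--             ret[group] = bucket
--         assert param not in bucket
--         bucket[param] = v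
--     return ret
-- ===== SOURCE B (Python) =====
-- def partition_sklearn_params(d):
--     # Pass 1: split every key once, asserting the '__' separator is present.
--     triples = []
--     for k, v in d.items():
--         ks = k.split("__", 1)
--         assert len(ks) == 2
--         triples.append((ks[0], ks[1], v))
--     # Pass 2: distinct groups in first-encounter order, then build each
--     # group's inner dict from its own (param, value) pairs.
--     groups = dict.fromkeys(g for g, _, _ in triples)
--     return {g: {p: v for g2, p, v in triples if g2 == g} for g in groups}
-- ===== Notes on version B (the rewrite author's own statement) =====
-- stated objective: alternative
-- what changed: Replaces A's single-pass hash-bucket insertion with a two-phase group-major strategy: one pass splits all keys into (group, param, value) triples, then the distinct groups (first-encounter order) are listed and each group's inner dict is built by filtering the triples for that group.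
import Mathlib
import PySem

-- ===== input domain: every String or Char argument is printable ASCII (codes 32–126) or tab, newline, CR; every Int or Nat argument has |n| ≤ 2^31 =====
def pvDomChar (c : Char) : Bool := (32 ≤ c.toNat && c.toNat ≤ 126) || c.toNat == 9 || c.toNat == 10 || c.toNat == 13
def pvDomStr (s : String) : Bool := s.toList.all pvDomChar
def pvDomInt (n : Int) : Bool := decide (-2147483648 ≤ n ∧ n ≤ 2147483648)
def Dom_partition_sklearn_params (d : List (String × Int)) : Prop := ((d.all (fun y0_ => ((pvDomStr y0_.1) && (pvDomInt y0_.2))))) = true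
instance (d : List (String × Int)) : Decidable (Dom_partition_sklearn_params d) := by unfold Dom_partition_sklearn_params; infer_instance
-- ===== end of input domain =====

-- B replaces A's single-pass hash-bucket insertion by a two-phase group-major
-- build (split all keys to triples, then one inner dict per distinct group);
-- alternative structure, not claimed faster.

-- ===== PORT A =====
-- The Python parameter is a dict: the assoc-list argument is read through
-- PySem.Dict.ofList (duplicate keys overwrite in place), and `d.items()` is
-- its items list.  `bucket[param] = v` mutating the dict stored at ret[group]
-- is modeled as overwrite-in-place (insert keeps the position of an existing key).
def partition_sklearn_params (d : List (String × Int)) : List (String × List (String × Int)) :=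
  let ret := ((PySem.Dict.ofList d).items).foldl
    (fun (ret : PySem.Dict String (PySem.Dict String Int)) kv =>
      let ks := (PySem.Str.splitMax? kv.1 "__" 1).getD []
      let group := ks.getD 0 ""
      let param := ks.getD 1 ""
      if ret.contains group then
        let bucket := ret.getD group PySem.Dict.empty
        ret.insert group (bucket.insert param kv.2)
      else
        let bucket : PySem.Dict String Int := PySem.Dict.empty
        ret.insert group (bucket.insert param kv.2))
    PySem.Dict.empty
  ret.items.map (fun p => (p.1, p.2.items))

-- ===== PORT B =====
def partition_sklearn_params_alt (d : List (String × Int)) : List (String × List (String × Int)) :=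
  let triples := ((PySem.Dict.ofList d).items).map
    (fun kv =>
      let ks := (PySem.Str.splitMax? kv.1 "__" 1).getD []
      (ks.getD 0 "", ks.getD 1 "", kv.2))
  let groups := PySem.List.dedup (triples.map (·.1))
  groups.map (fun g =>
    (g, ((triples.filter (fun t => t.1 == g)).foldl
          (fun (dd : PySem.Dict String Int) t => dd.insert t.2.1 t.2.2)
          PySem.Dict.empty).items))

-- ===== PRECONDITION & SPEC =====
-- Pre_ excludes exactly the inputs on which Python A raises AssertionError:
-- a key without the substring "__" (the second assert, `param not in bucket`,
-- is unreachable on a dict whose keys all contain "__").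
def Pre_partition_sklearn_params (d : List (String × Int)) : Prop :=
  (d.all (fun kv => PySem.Str.isIn "__" kv.1)) = true
instance (d : List (String × Int)) : Decidable (Pre_partition_sklearn_params d) := by
  unfold Pre_partition_sklearn_params; infer_instance

def pvWitness_partition_sklearn_params : (List (String × Int)) :=
  [("a__b", 1), ("a__c", 2), ("x__y", 3)]

def Spec_partition_sklearn_params (d : List (String × Int)) (out : List (String × List (String × Int))) : Prop := out = partition_sklearn_params_alt d
instance (d : List (String × Int)) (out : List (String × List (String × Int))) : Decidable (Spec_partition_sklearn_params d out) := by unfold Spec_partition_sklearn_params; infer_instance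

-- ===== CLAIM (what is proved, stated in full; the proofs are below) =====
def Claim_equal_partition_sklearn_params : Prop := ∀ (d : List (String × Int)), Dom_partition_sklearn_params d → Pre_partition_sklearn_params d → Spec_partition_sklearn_params d (partition_sklearn_params d)

-- ===== LEMMAS AND PROOFS =====

-- A's loop body is `modify` at the group key.
theorem pvStepA_eq_modify (acc : PySem.Dict String (PySem.Dict String Int))
    (g p : String) (v : Int) :
    (if acc.contains g then
       acc.insert g ((acc.getD g PySem.Dict.empty).insert p v)
     else
       acc.insert g ((PySem.Dict.empty : PySem.Dict String Int).insert p v))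
    = acc.modify g PySem.Dict.empty (fun dd => dd.insert p v) := by
  by_cases h : acc.contains g = true
  · simp [h, PySem.Dict.modify, PySem.Dict.getD_eq_get?_getD]
  · simp only [Bool.not_eq_true] at h
    simp [h, PySem.Dict.modify, PySem.Dict.getD_of_not_contains acc PySem.Dict.empty h]

-- getD of a grouping fold is the fold over that group's own elements.
theorem pvGetD_foldl_modify (t : List (String × String × Int))
    (d : PySem.Dict String (PySem.Dict String Int)) (g : String) :
    ((t.foldl (fun d x => d.modify x.1 PySem.Dict.empty (fun dd => dd.insert x.2.1 x.2.2)) d).getD g PySem.Dict.empty)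
    = (t.filter (fun x => x.1 == g)).foldl
        (fun dd x => dd.insert x.2.1 x.2.2) (d.getD g PySem.Dict.empty) := by
  induction t generalizing d with
  | nil => rfl
  | cons x t ih =>
    simp only [List.foldl_cons, List.filter_cons]
    rw [ih]
    by_cases h : x.1 = g
    · subst h
      simp [PySem.Dict.modify, PySem.Dict.getD_eq_get?_getD]
    · have hx : (x.1 == g) = false := by simp [h]
      have hgx : ¬ g = x.1 := fun hh => h hh.symm
      simp [hx, PySem.Dict.getD_modify, hgx]

-- The core grouping fact: A's fold, rendered as items, is B's group-major build.
theorem pvGrouping (t : List (String × String × Int)) :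
    ((t.foldl (fun d x => d.modify x.1 PySem.Dict.empty (fun dd => dd.insert x.2.1 x.2.2))
        (PySem.Dict.empty : PySem.Dict String (PySem.Dict String Int))).items).map
        (fun p => (p.1, p.2.items))
    = (PySem.List.dedup (t.map (·.1))).map (fun g =>
        (g, ((t.filter (fun x => x.1 == g)).foldl
              (fun (dd : PySem.Dict String Int) x => dd.insert x.2.1 x.2.2)
              PySem.Dict.empty).items)) := by
  set F := fun (d : PySem.Dict String (PySem.Dict String Int)) (x : String × String × Int) =>
      d.modify x.1 PySem.Dict.empty (fun dd => dd.insert x.2.1 x.2.2) with hF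
  have hnd : (t.foldl F PySem.Dict.empty).keys.Nodup := by
    rw [hF]
    exact PySem.Dict.nodup_keys_foldl_modify_key t (·.1) PySem.Dict.empty
      (fun _ x => fun dd => dd.insert x.2.1 x.2.2) PySem.Dict.empty
      (by simp)
  have hkeys : (t.foldl F PySem.Dict.empty).keys = PySem.List.dedup (t.map (·.1)) := by
    rw [hF]
    rw [PySem.Dict.keys_foldl_modify_key t (·.1) PySem.Dict.empty
      (fun _ x => fun dd => dd.insert x.2.1 x.2.2) PySem.Dict.empty]
    simp [PySem.Dict.keys_empty, PySem.List.dedup_eq_ofList]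
    rfl
  rw [PySem.Dict.items_eq_map_keys _ hnd PySem.Dict.empty, hkeys, List.map_map]
  refine List.map_congr_left (fun g _ => ?_)
  simp only [Function.comp]
  rw [hF, pvGetD_foldl_modify]
  simp [PySem.Dict.getD_empty]

-- ===== VERDICT (by name: the statement is the Claim_ definition above) =====
theorem partition_sklearn_params_spec : Claim_equal_partition_sklearn_params := by
  intro d _ _
  unfold Spec_partition_sklearn_params partition_sklearn_params partition_sklearn_params_alt
  set l := (PySem.Dict.ofList d).items with hl
  set e := fun (kv : String × Int) =>
    (((PySem.Str.splitMax? kv.1 "__" 1).getD []).getD 0 "",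
     ((PySem.Str.splitMax? kv.1 "__" 1).getD []).getD 1 "", kv.2) with he
  have h1 : l.foldl
      (fun (ret : PySem.Dict String (PySem.Dict String Int)) kv =>
        let ks := (PySem.Str.splitMax? kv.1 "__" 1).getD []
        let group := ks.getD 0 ""
        let param := ks.getD 1 ""
        if ret.contains group then
          let bucket := ret.getD group PySem.Dict.empty
          ret.insert group (bucket.insert param kv.2)
        else
          let bucket : PySem.Dict String Int := PySem.Dict.empty
          ret.insert group (bucket.insert param kv.2)) PySem.Dict.empty
      = (l.map e).foldl
        (fun d x => d.modify x.1 PySem.Dict.empty (fun dd => dd.insert x.2.1 x.2.2))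
        PySem.Dict.empty := by
    rw [List.foldl_map]
    refine PySem.List.foldl_congr_mem l _ _ _ (fun acc kv _ => ?_)
    exact pvStepA_eq_modify acc _ _ kv.2
  rw [h1, pvGrouping (l.map e)]
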